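-- pv_equiv track=rewrite | github.com/mcfaraz/CSAssignments | CS917/Assignment2/practical.py | partialDecode
-- ===== SOURCE A (Python) =====
-- def morseDecode(inputStringList):
--     """
--     This method should take a list of strings as input. Each string is equivalent to one letter
--     (i.e. one morse code string). The entire list of strings represents a word.
--
--     This method should convert the strings from morse code into english, and return the word as a string.
--
--     """
--     # Please complete this method to perform the above described function
--     morseLetters = {'.-': 'A', '-...': 'B', '-.-.': 'C', '-..': 'D', '.': 'E', '--.': 'G', '..-.': 'F', '....': 'H'
--         , '..': 'I', '.---': 'J', '-.-': 'K', '.-..': 'L', '--': 'M', '-.': 'N', '---': 'O', '.--.': 'P'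
--         , '--.-': 'Q', '.-.': 'R', '...': 'S', '-': 'T', '..-': 'U', '...-': 'V', '.--': 'W', '-..-': 'X', '-.--': 'Y'
--         , '--..': 'Z', '.----': '1', '..---': '2', '...--': '3', '....-': '4', '.....': '5', '-....': '6'
--         , '--...': '7', '---..': '8', '----.': '9', '-----': '0'}
--
--     decoded_word = ''
--     for letter in inputStringList:
--         decoded_word += morseLetters[letter]
--
--     return decoded_word
--
-- def partialDecode(inputStringList, words):
--     if len(inputStringList) == 0:
--         return words
--     out = []
--     for w in words:
--         out.append(w + morseDecode(['-' + inputStringList[0][1:]]))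
--         out.append(w + morseDecode(['.' + inputStringList[0][1:]]))
--     return partialDecode(inputStringList[1:], out)
-- ===== SOURCE B (Python) =====
-- _MORSE = {'.-': 'A', '-...': 'B', '-.-.': 'C', '-..': 'D', '.': 'E', '--.': 'G', '..-.': 'F', '....': 'H'
--     , '..': 'I', '.---': 'J', '-.-': 'K', '.-..': 'L', '--': 'M', '-.': 'N', '---': 'O', '.--.': 'P'
--     , '--.-': 'Q', '.-.': 'R', '...': 'S', '-': 'T', '..-': 'U', '...-': 'V', '.--': 'W', '-..-': 'X', '-.--': 'Y'
--     , '--..': 'Z', '.----': '1', '..---': '2', '...--': '3', '....-': '4', '.....': '5', '-....': '6'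
--     , '--...': '7', '---..': '8', '----.': '9', '-----': '0'}
--
-- def _extend(w, letters, out):
--     # depth-first: emit every completion of prefix w, '-' variant before '.' variant
--     if not letters:
--         out.append(w)
--         return
--     l = letters[0]
--     _extend(w + _MORSE['-' + l[1:]], letters[1:], out)
--     _extend(w + _MORSE['.' + l[1:]], letters[1:], out)
--
-- def partialDecode(inputStringList, words):
--     out = []
--     for w in words:
--         _extend(w, inputStringList, out)
--     return out
-- ===== Notes on version B (the rewrite author's own statement) =====
-- stated objective: alternative
-- what changed: Replaces A's breadth-first level-by-level rebuild of the whole word list (one pass per morse letter, recursing on the remaining letters with the expanded list) by a depth-first per-word recursion that emits each completed word directly into the output, with direct dict lookups instead of a morseDecode string-building call per lookup.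
import Mathlib
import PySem

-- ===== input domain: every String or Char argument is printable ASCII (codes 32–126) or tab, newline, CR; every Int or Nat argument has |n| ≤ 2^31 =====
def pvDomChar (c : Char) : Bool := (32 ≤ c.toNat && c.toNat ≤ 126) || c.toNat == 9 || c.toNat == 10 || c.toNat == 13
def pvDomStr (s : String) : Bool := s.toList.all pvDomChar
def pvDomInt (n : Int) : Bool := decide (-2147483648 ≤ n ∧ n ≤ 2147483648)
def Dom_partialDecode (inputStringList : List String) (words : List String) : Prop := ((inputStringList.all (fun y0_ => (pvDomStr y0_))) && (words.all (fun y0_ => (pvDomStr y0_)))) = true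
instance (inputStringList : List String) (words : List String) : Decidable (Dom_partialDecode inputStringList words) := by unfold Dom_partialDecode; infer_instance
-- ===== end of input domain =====

-- B replaces A's breadth-first rebuild of the whole word list per letter by a depth-first
-- per-word recursion that emits completed words directly (objective: alternative; return value only).

-- ===== PORT A =====
-- the morseLetters dict of morseDecode (shared data, also used by B's port and by Pre_)
def pvMorse : PySem.Dict String String := PySem.Dict.ofList
  [(".-","A"), ("-...","B"), ("-.-.","C"), ("-..","D"), (".","E"), ("--.","G"), ("..-.","F"), ("....","H"),
   ("..","I"), (".---","J"), ("-.-","K"), (".-..","L"), ("--","M"), ("-.","N"), ("---","O"), (".--.","P"),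
   ("--.-","Q"), (".-.","R"), ("...","S"), ("-","T"), ("..-","U"), ("...-","V"), (".--","W"), ("-..-","X"), ("-.--","Y"),
   ("--..","Z"), (".----","1"), ("..---","2"), ("...--","3"), ("....-","4"), (".....","5"), ("-....","6"),
   ("--...","7"), ("---..","8"), ("----.","9"), ("-----","0")]

-- morseDecode: fold over the letters; the `.getD ""` default is only reached where Python
-- raises KeyError — those inputs are excluded by Pre_partialDecode.
def morseDecodeA (inputStringList : List String) : String :=
  inputStringList.foldl (fun acc letter => acc ++ ((pvMorse.get? letter).getD "")) ""

def partialDecode (inputStringList : List String) (words : List String) : List String :=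
  match inputStringList with
  | [] => words
  | l :: rest =>
    let out := words.foldl (fun out w =>
      (out ++ [w ++ morseDecodeA ["-" ++ PySem.Str.slice l (some 1) none]])
        ++ [w ++ morseDecodeA ["." ++ PySem.Str.slice l (some 1) none]]) []
    partialDecode rest out

-- ===== PORT B =====
-- _extend: depth-first emission of the completions of prefix w into the accumulator out
-- (Python mutates `out` via append; ported as an accumulator-passing recursion, '-' branch first)
def pvExtend (w : String) (letters : List String) (out : List String) : List String :=
  match letters with
  | [] => out ++ [w]
  | l :: rest =>
    let out := pvExtend (w ++ ((pvMorse.get? ("-" ++ PySem.Str.slice l (some 1) none)).getD "")) rest out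
    pvExtend (w ++ ((pvMorse.get? ("." ++ PySem.Str.slice l (some 1) none)).getD "")) rest out

def partialDecode_alt (inputStringList : List String) (words : List String) : List String :=
  words.foldl (fun out w => pvExtend w inputStringList out) []

-- ===== PRECONDITION & SPEC =====
-- Python A raises KeyError iff words is nonempty and some letter yields an invalid forced code
-- (with words == [] neither program ever looks a code up, so both return [] whatever the codes).
def Pre_partialDecode (inputStringList : List String) (words : List String) : Prop :=
  words = [] ∨ ∀ l ∈ inputStringList,
    pvMorse.contains ("-" ++ PySem.Str.slice l (some 1) none) = true ∧
    pvMorse.contains ("." ++ PySem.Str.slice l (some 1) none) = true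
instance (inputStringList : List String) (words : List String) : Decidable (Pre_partialDecode inputStringList words) := by unfold Pre_partialDecode; infer_instance
def pvWitness_partialDecode : List String × List String := ([".-", ".."], [])

def Spec_partialDecode (inputStringList : List String) (words : List String) (out : List String) : Prop := out = partialDecode_alt inputStringList words
instance (inputStringList : List String) (words : List String) (out : List String) : Decidable (Spec_partialDecode inputStringList words out) := by unfold Spec_partialDecode; infer_instance

-- ===== CLAIM (what is proved, stated in full; the proofs are below) =====
def Claim_equal_partialDecode : Prop := ∀ (inputStringList : List String) (words : List String), Dom_partialDecode inputStringList words → Pre_partialDecode inputStringList words → Spec_partialDecode inputStringList words (partialDecode inputStringList words)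

-- ===== LEMMAS AND PROOFS =====

-- the two forced lookups for a letter, and the tree of suffixes they generate
def pvDa (l : String) : String := (pvMorse.get? ("-" ++ PySem.Str.slice l (some 1) none)).getD ""
def pvDb (l : String) : String := (pvMorse.get? ("." ++ PySem.Str.slice l (some 1) none)).getD ""

-- mathematical characterisation: the list of all suffixes generated by a letter list
def pvSfx : List String → List String
  | [] => [""]
  | l :: rest => (pvSfx rest).map (pvDa l ++ ·) ++ (pvSfx rest).map (pvDb l ++ ·)

-- B's _extend appends exactly the suffix tree of w to its accumulator
theorem pvExtend_spec (letters : List String) (w : String) (out : List String) :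
    pvExtend w letters out = out ++ (pvSfx letters).map (w ++ ·) := by
  induction letters generalizing w out with
  | nil => simp [pvExtend, pvSfx]
  | cons l rest ih =>
    simp [pvExtend, pvSfx, ih, pvDa, pvDb, List.map_map, Function.comp_def,
      String.append_assoc, List.append_assoc]

-- morseDecode on a one-letter list is one dict lookup
theorem morseDecodeA_singleton (x : String) :
    morseDecodeA [x] = (pvMorse.get? x).getD "" := by
  simp [morseDecodeA]

-- A's per-letter loop (two appends per word, accumulator started at []) is a flatMap
theorem pvStepEq (words : List String) (f g : String → String) :
    words.foldl (fun out w => (out ++ [f w]) ++ [g w]) [] =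
      words.flatMap (fun w => [f w, g w]) := by
  have h : (fun (out : List String) (w : String) => (out ++ [f w]) ++ [g w]) =
      fun out w => out ++ [f w, g w] := by
    funext out w; simp
  rw [h, PySem.List.foldl_append_eq_flatMap]
  simp

-- A's breadth-first recursion produces, for each word, its full suffix tree
theorem pvA_char (letters words : List String) :
    partialDecode letters words = words.flatMap (fun w => (pvSfx letters).map (w ++ ·)) := by
  induction letters generalizing words with
  | nil => simp [partialDecode, pvSfx]
  | cons l rest ih =>
    simp only [partialDecode, pvStepEq, morseDecodeA_singleton, ih]
    simp [pvSfx, pvDa, pvDb, List.flatMap_assoc, List.map_map, Function.comp_def,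
      String.append_assoc]

-- B's loop over words is the same flatMap
theorem pvB_char (letters words : List String) :
    partialDecode_alt letters words = words.flatMap (fun w => (pvSfx letters).map (w ++ ·)) := by
  unfold partialDecode_alt
  have h : (fun (out : List String) (w : String) => pvExtend w letters out) =
      fun out w => out ++ (pvSfx letters).map (w ++ ·) := by
    funext out w; exact pvExtend_spec letters w out
  rw [h, PySem.List.foldl_append_eq_flatMap]
  simp

-- ===== VERDICT (by name: the statement is the Claim_ definition above) =====
theorem partialDecode_spec : Claim_equal_partialDecode := by
  intro i w _ _
  rw [Spec_partialDecode, pvA_char, pvB_char]
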